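-- pv_equiv track=rewrite | github.com/chingsley/algorithms | arrays/hard/minRewards/python/solution2.py | minRewards
-- ===== SOURCE A (Python) =====
-- def minRewards(scores):
--     minRewards = [1 for n in scores]
--     for i in range(1, len(scores)):
--         if scores[i] < scores[i - 1]:
--             continue
--         minRewards[i] = max(minRewards[i], minRewards[i - 1] + 1)
--
--     for i in reversed(range(0, len(scores)-1)):
--         if scores[i] < scores[i + 1]:
--             continue
--         minRewards[i] = max(minRewards[i], minRewards[i + 1] + 1)
--
--     return sum(minRewards)
-- ===== SOURCE B (Python) =====
-- def minRewards(scores):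
--     n = len(scores)
--     # asc[i]: length of the weakly ascending run ending at i
--     asc = []
--     for i in range(n):
--         asc.append(asc[i - 1] + 1 if i > 0 and scores[i - 1] <= scores[i] else 1)
--     total = 0
--     for i in range(n):
--         # person i must out-reward everyone along the weakly
--         # descending stretch to their right
--         best = asc[i]
--         j = i
--         while j < n - 1 and scores[j] >= scores[j + 1]:
--             j += 1
--             best = max(best, asc[j] + (j - i))
--         total += best
--     return total
-- ===== Notes on version B (the rewrite author's own statement) =====
-- stated objective: alternative
-- what changed: Replaces A's two in-place relaxation passes over a shared DP rewards array (forward relax, backward relax, then sum) by a per-index computation: one pass precomputes the weakly-ascending run length ending at each index, then for each index a scan walks the weakly descending stretch to its right taking the best asc[j]+(j-i), accumulating rewards straight into a running total with no rewards table.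
import Mathlib
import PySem

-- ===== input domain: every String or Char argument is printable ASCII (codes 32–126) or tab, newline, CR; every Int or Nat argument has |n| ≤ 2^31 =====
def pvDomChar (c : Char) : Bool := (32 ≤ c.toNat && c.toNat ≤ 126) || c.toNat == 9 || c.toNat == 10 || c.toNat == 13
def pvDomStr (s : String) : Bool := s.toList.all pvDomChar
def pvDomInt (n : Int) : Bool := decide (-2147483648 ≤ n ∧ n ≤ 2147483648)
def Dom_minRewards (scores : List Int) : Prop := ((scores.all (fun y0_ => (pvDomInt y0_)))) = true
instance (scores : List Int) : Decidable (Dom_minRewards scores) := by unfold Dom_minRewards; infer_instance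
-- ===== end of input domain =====

-- B replaces A's two array passes over a shared DP table by a direct per-index scan
-- (a run-length helper plus a walk down the weakly descending stretch); alternative
-- decomposition, not faster.

-- ===== PORT A =====
-- all indices drawn from pyRange are nonnegative and in range, so pyGetD/pySetD are exact here
def minRewards (scores : List Int) : Int :=
  let mr0 : List Int := scores.map (fun _ => (1 : Int))
  let mr1 : List Int := (PySem.List.pyRange 1 (scores.length : Int) 1).foldl
    (fun mr i =>
      if PySem.List.pyGetD scores i 0 < PySem.List.pyGetD scores (i - 1) 0 then mr
      else PySem.List.pySetD mr i
        (max (PySem.List.pyGetD mr i 0) (PySem.List.pyGetD mr (i - 1) 0 + 1))) mr0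
  let mr2 : List Int := ((PySem.List.pyRange 0 ((scores.length : Int) - 1) 1).reverse).foldl
    (fun mr i =>
      if PySem.List.pyGetD scores i 0 < PySem.List.pyGetD scores (i + 1) 0 then mr
      else PySem.List.pySetD mr i
        (max (PySem.List.pyGetD mr i 0) (PySem.List.pyGetD mr (i + 1) 0 + 1))) mr1
  mr2.sum

-- ===== PORT B =====
-- 'asc.append(asc[i-1] + 1 if i > 0 and scores[i-1] <= scores[i] else 1)' over range(n)
-- (all indices used are in range, so getD is exact)
def buildAsc (scores : List Int) : List Int :=
  (List.range scores.length).foldl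
    (fun asc i =>
      asc ++ [if 0 < i ∧ scores.getD (i-1) 0 ≤ scores.getD i 0 then asc.getD (i-1) 0 + 1 else 1])
    []

-- 'while j < n-1 and scores[j] >= scores[j+1]: j += 1; best = max(best, asc[j]+(j-i))'
-- with fuel d = n-1-j, the room left for j
def scanB (scores asc : List Int) (i : Nat) : Nat → Nat → Int → Int
  | 0, _, best => best
  | d+1, j, best =>
      if scores.getD j 0 ≥ scores.getD (j+1) 0 then
        scanB scores asc i d (j+1) (max best (asc.getD (j+1) 0 + ((j+1-i : Nat) : Int)))
      else best

def minRewards_alt (scores : List Int) : Int :=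
  let asc := buildAsc scores
  (List.range scores.length).foldl
    (fun total i =>
      total + scanB scores asc i (scores.length - 1 - i) i (asc.getD i 0)) 0

-- ===== PRECONDITION & SPEC =====
def Spec_minRewards (scores : List Int) (out : Int) : Prop := out = minRewards_alt scores
instance (scores : List Int) (out : Int) : Decidable (Spec_minRewards scores out) := by unfold Spec_minRewards; infer_instance

-- ===== CLAIM (what is proved, stated in full; the proofs are below) =====
def Claim_equal_minRewards : Prop := ∀ (scores : List Int), Dom_minRewards scores → Spec_minRewards scores (minRewards scores)

-- ===== LEMMAS AND PROOFS =====

-- A's forward-pass value at index i: length of the weakly-ascending run ending at i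
def upA (s : List Int) : Nat → Int
  | 0 => 1
  | i+1 => if s.getD (i+1) 0 < s.getD i 0 then 1 else upA s i + 1

-- A's final value at index i, for fuel d = length-1-i
def mA (s : List Int) : Nat → Nat → Int
  | 0, i => upA s i
  | d+1, i => if s.getD i 0 < s.getD (i+1) 0 then upA s i
              else max (upA s i) (mA s d (i+1) + 1)

def stepF (s : List Int) (mr : List Int) (i : Int) : List Int :=
  if PySem.List.pyGetD s i 0 < PySem.List.pyGetD s (i - 1) 0 then mr
  else PySem.List.pySetD mr i
    (max (PySem.List.pyGetD mr i 0) (PySem.List.pyGetD mr (i - 1) 0 + 1))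

def stepB (s : List Int) (mr : List Int) (i : Int) : List Int :=
  if PySem.List.pyGetD s i 0 < PySem.List.pyGetD s (i + 1) 0 then mr
  else PySem.List.pySetD mr i
    (max (PySem.List.pyGetD mr i 0) (PySem.List.pyGetD mr (i + 1) 0 + 1))

lemma minRewards_eq (s : List Int) :
    minRewards s =
      (((PySem.List.pyRange 0 ((s.length : Int) - 1) 1).reverse).foldl (stepB s)
        ((PySem.List.pyRange 1 (s.length : Int) 1).foldl (stepF s)
          (s.map (fun _ => (1 : Int))))).sum := rfl

lemma one_le_upA (s : List Int) (i : Nat) : 1 ≤ upA s i := by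
  induction i with
  | zero => simp [upA]
  | succ i ih => simp only [upA]; split <;> omega

lemma upA_le_mA (s : List Int) (d i : Nat) : upA s i ≤ mA s d i := by
  cases d with
  | zero => simp [mA]
  | succ d =>
    simp only [mA]
    split
    · exact le_refl _
    · exact le_max_left _ _

-- getD after set, over Int lists
lemma getD_set_int (l : List Int) (n i : Nat) (v : Int) :
    (l.set n v).getD i 0 = if i = n ∧ n < l.length then v else l.getD i 0 := by
  by_cases hi : i < l.length
  · rw [List.getD_eq_getElem l _ hi, List.getD_eq_getElem _ _ (by simpa using hi),
      List.getElem_set]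
    split_ifs with h1 h2 h3 <;> first | rfl | omega
  · rw [List.getD_eq_default _ _ (by rw [List.length_set]; omega),
      List.getD_eq_default _ _ (by omega)]
    split_ifs with h1
    · omega
    · rfl

lemma sum_eq_sum_getD (l : List Int) :
    l.sum = ((List.range l.length).map (fun i => l.getD i 0)).sum := by
  induction l with
  | nil => simp
  | cons x xs ih =>
    rw [List.length_cons, List.range_succ_eq_map, List.map_cons, List.map_map, List.sum_cons]
    simp only [Function.comp_def, List.getD_cons_succ, List.getD_cons_zero]
    rw [List.sum_cons, ← ih]

-- forward pass invariant
lemma fwd_inv (s : List Int) (k : Nat) (hk1 : 1 ≤ k) (hkn : k ≤ s.length) :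
    ((PySem.List.pyRange 1 (k : Int) 1).foldl (stepF s) (s.map (fun _ => (1 : Int)))).length = s.length ∧
    ∀ i < s.length,
      ((PySem.List.pyRange 1 (k : Int) 1).foldl (stepF s) (s.map (fun _ => (1 : Int)))).getD i 0 =
        if i < k then upA s i else 1 := by
  induction k with
  | zero => omega
  | succ k ih =>
    rcases Nat.eq_zero_or_pos k with rfl | hk
    · rw [show ((1:Nat):Int) = 1 by norm_num, PySem.List.pyRange_one_eq_nil (by norm_num)]
      simp only [List.foldl_nil]
      refine ⟨by simp, fun i hi => ?_⟩
      rw [List.getD_eq_getElem _ _ (by simpa using hi)]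
      simp only [List.getElem_map]
      split_ifs with h
      · interval_cases i; simp [upA]
      · rfl
    · obtain ⟨hlen, hval⟩ := ih hk (by omega)
      rw [show ((k+1:Nat):Int) = (k:Int)+1 by push_cast; ring,
        PySem.List.pyRange_one_succ_right (by exact_mod_cast hk), List.foldl_append,
        List.foldl_cons, List.foldl_nil]
      set R := (PySem.List.pyRange 1 (k : Int) 1).foldl (stepF s) (s.map (fun _ => (1 : Int))) with hR
      obtain ⟨k', rfl⟩ : ∃ k', k = k' + 1 := ⟨k - 1, by omega⟩
      unfold stepF
      rw [show ((k'+1:Nat):Int) - 1 = ((k':Nat):Int) by push_cast; ring]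
      simp only [PySem.List.pyGetD_natCast, PySem.List.pySetD_natCast]
      split_ifs with hlt
      · refine ⟨hlen, fun i hi => ?_⟩
        rw [hval i hi]
        rcases Nat.lt_trichotomy i (k'+1) with h | rfl | h
        · rw [if_pos h, if_pos (by omega)]
        · rw [if_neg (by omega), if_pos (by omega)]
          simp only [upA, if_pos hlt]
        · rw [if_neg (by omega), if_neg (by omega)]
      · have e1 : R.getD (k'+1) 0 = 1 := by rw [hval (k'+1) (by omega), if_neg (by omega)]
        have e2 : R.getD k' 0 = upA s k' := by rw [hval k' (by omega), if_pos (by omega)]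
        rw [e1, e2]
        refine ⟨by rw [List.length_set, hlen], fun i hi => ?_⟩
        rw [getD_set_int, hlen]
        rcases Nat.lt_trichotomy i (k'+1) with h | rfl | h
        · rw [if_neg (by omega), hval i hi, if_pos h, if_pos (by omega)]
        · rw [if_pos ⟨rfl, by omega⟩, if_pos (by omega)]
          have h4 := one_le_upA s k'
          simp only [upA, if_neg hlt]
          omega
        · rw [if_neg (by omega), hval i hi, if_neg (by omega), if_neg (by omega)]

-- backward pass invariant
lemma bwd_inv (s : List Int) (m : Nat) (hm : m ≤ s.length - 1) (b : List Int)
    (hlen : b.length = s.length)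
    (hb : ∀ i < s.length, b.getD i 0 = if m ≤ i then mA s (s.length - 1 - i) i else upA s i) :
    (((PySem.List.pyRange 0 (m : Int) 1).reverse).foldl (stepB s) b).length = s.length ∧
    ∀ i < s.length,
      (((PySem.List.pyRange 0 (m : Int) 1).reverse).foldl (stepB s) b).getD i 0 =
        mA s (s.length - 1 - i) i := by
  induction m generalizing b with
  | zero =>
    rw [show ((0:Nat):Int) = 0 by norm_num, PySem.List.pyRange_one_eq_nil (by norm_num)]
    simp only [List.reverse_nil, List.foldl_nil]
    exact ⟨hlen, fun i hi => by rw [hb i hi, if_pos (by omega)]⟩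
  | succ m ih =>
    rw [show ((m+1:Nat):Int) = (m:Int)+1 by push_cast; ring,
      PySem.List.pyRange_one_succ_right (by positivity), List.reverse_append,
      List.reverse_singleton, List.singleton_append, List.foldl_cons]
    refine ih (by omega) _ ?_ ?_
    · unfold stepB
      split_ifs
      · exact hlen
      · rw [PySem.List.pySetD_natCast, List.length_set, hlen]
    · intro i hi
      unfold stepB
      rw [show ((m:Nat):Int) + 1 = ((m+1:Nat):Int) by push_cast; ring]
      simp only [PySem.List.pyGetD_natCast, PySem.List.pySetD_natCast]
      have hmn : m + 1 < s.length := by omega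
      have hmb : s.length - 1 - m = (s.length - 1 - (m+1)) + 1 := by omega
      by_cases hlt : s.getD m 0 < s.getD (m+1) 0
      · rw [if_pos hlt, hb i hi]
        rcases Nat.lt_trichotomy i m with h | rfl | h
        · rw [if_neg (by omega), if_neg (by omega)]
        · rw [if_neg (by omega), if_pos (by omega), hmb]
          simp only [mA, if_pos hlt]
        · rw [if_pos (by omega), if_pos (by omega)]
      · rw [if_neg hlt]
        have e1 : b.getD (m+1) 0 = mA s (s.length - 1 - (m+1)) (m+1) := by
          rw [hb (m+1) hmn, if_pos (le_refl _)]
        have e2 : b.getD m 0 = upA s m := by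
          rw [hb m (by omega), if_neg (by omega)]
        rw [e1, e2, getD_set_int, hlen]
        rcases Nat.lt_trichotomy i m with h | rfl | h
        · rw [if_neg (by omega), hb i hi, if_neg (by omega), if_neg (by omega)]
        · rw [if_pos ⟨rfl, by omega⟩, hmb]
          simp only [mA, if_neg hlt]
          rw [if_pos (le_refl _)]
        · rw [if_neg (by omega), hb i hi, if_pos (by omega), if_pos (by omega)]

lemma minRewards_eq_sum (s : List Int) :
    minRewards s = ((List.range s.length).map (fun i => mA s (s.length - 1 - i) i)).sum := by
  rcases Nat.eq_zero_or_pos s.length with h0 | h1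
  · obtain rfl : s = [] := List.length_eq_zero_iff.mp h0
    rfl
  · rw [minRewards_eq]
    obtain ⟨hflen, hfval⟩ := fwd_inv s s.length h1 (le_refl _)
    rw [show ((s.length:Nat):Int) - 1 = ((s.length - 1 : Nat):Int) by omega]
    have hbinit : ∀ i < s.length,
        ((PySem.List.pyRange 1 (s.length : Int) 1).foldl (stepF s)
          (s.map (fun _ => (1:Int)))).getD i 0 =
          if s.length - 1 ≤ i then mA s (s.length - 1 - i) i else upA s i := by
      intro i hi
      rw [hfval i hi, if_pos hi]
      split_ifs with h2
      · have he : i = s.length - 1 := by omega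
        subst he
        rw [show s.length - 1 - (s.length - 1) = 0 by omega]
        rfl
      · rfl
    obtain ⟨hblen, hbval⟩ := bwd_inv s (s.length - 1) (le_refl _) _ hflen hbinit
    rw [sum_eq_sum_getD, hblen]
    exact congrArg List.sum (List.map_congr_left fun i hi =>
      hbval i (List.mem_range.mp hi))

def ascStep (s : List Int) (asc : List Int) (i : Nat) : List Int :=
  asc ++ [if 0 < i ∧ s.getD (i-1) 0 ≤ s.getD i 0 then asc.getD (i-1) 0 + 1 else 1]

lemma buildAsc_eq (s : List Int) : buildAsc s = (List.range s.length).foldl (ascStep s) [] := rfl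

lemma buildAsc_inv (s : List Int) (k : Nat) (hk : k ≤ s.length) :
    ((List.range k).foldl (ascStep s) ([] : List Int)).length = k ∧
    ∀ j < k, ((List.range k).foldl (ascStep s) ([] : List Int)).getD j 0 = upA s j := by
  induction k with
  | zero => simp
  | succ k ih =>
    obtain ⟨hlen, hval⟩ := ih (by omega)
    set asc := (List.range k).foldl (ascStep s) ([] : List Int) with hasc
    have he : (List.range (k+1)).foldl (ascStep s) ([] : List Int) =
        asc ++ [if 0 < k ∧ s.getD (k-1) 0 ≤ s.getD k 0 then asc.getD (k-1) 0 + 1 else 1] := by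
      rw [List.range_succ, List.foldl_append, List.foldl_cons, List.foldl_nil, ← hasc]
      rfl
    have hv : (if 0 < k ∧ s.getD (k-1) 0 ≤ s.getD k 0 then asc.getD (k-1) 0 + 1 else 1) =
        upA s k := by
      cases k with
      | zero => simp [upA]
      | succ k' =>
        rw [show k' + 1 - 1 = k' from rfl, hval k' (by omega)]
        simp only [upA]
        rcases lt_or_ge (s.getD (k'+1) 0) (s.getD k' 0) with h | h
        · rw [if_neg (by omega), if_pos h]
        · rw [if_pos ⟨by omega, h⟩, if_neg (by omega)]
    rw [he, hv]
    constructor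
    · rw [List.length_append, hlen]; rfl
    · intro j hj
      rcases Nat.lt_or_ge j k with h | h
      · rw [List.getD_eq_getElem _ _ (by rw [List.length_append, hlen]; simp; omega),
          List.getElem_append_left (show j < asc.length by omega),
          ← List.getD_eq_getElem _ _ (show j < asc.length by omega), hval j h]
      · have hjk : j = k := by omega
        subst hjk
        rw [List.getD_eq_getElem _ _ (by rw [List.length_append, hlen]; simp),
          List.getElem_append_right (show asc.length ≤ j by omega)]
        simp [hlen]

lemma scanB_eq (s asc : List Int) (hasc : ∀ j < s.length, asc.getD j 0 = upA s j) (i : Nat) :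
    ∀ (d j : Nat) (best : Int), i ≤ j → j + d < s.length →
      upA s j + ((j : Int) - (i : Int)) ≤ best →
      scanB s asc i d j best = max best (mA s d j + ((j : Int) - (i : Int))) := by
  intro d
  induction d with
  | zero =>
    intro j best _ _ hb
    simp only [scanB, mA]
    exact (max_eq_left hb).symm
  | succ d ih =>
    intro j best hij hjd hb
    simp only [scanB, mA]
    rcases lt_or_ge (s.getD j 0) (s.getD (j+1) 0) with h | h
    · rw [if_neg (show ¬ s.getD j 0 ≥ s.getD (j+1) 0 by omega), if_pos h]
      exact (max_eq_left hb).symm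
    · rw [if_pos (show s.getD j 0 ≥ s.getD (j+1) 0 from h),
        if_neg (show ¬ s.getD j 0 < s.getD (j+1) 0 by omega)]
      have hc : ((j + 1 - i : Nat) : Int) = ((j+1 : Nat) : Int) - (i : Int) := by omega
      rw [hasc (j+1) (by omega), hc,
        ih (j+1) _ (by omega) (by omega) (le_max_right _ _)]
      have habs : upA s (j+1) + (((j+1:Nat):Int) - (i:Int)) ≤
          mA s d (j+1) + (((j+1:Nat):Int) - (i:Int)) := by
        have := upA_le_mA s d (j+1); omega
      rw [max_assoc, max_eq_right habs]
      have hM : mA s d (j+1) + (((j+1:Nat):Int) - (i:Int)) =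
          mA s d (j+1) + 1 + ((j:Int) - (i:Int)) := by push_cast; ring
      rw [hM, ← max_add_add_right, ← max_assoc, max_eq_left hb]

lemma minRewards_alt_eq_sum (s : List Int) :
    minRewards_alt s = ((List.range s.length).map (fun i => mA s (s.length - 1 - i) i)).sum := by
  unfold minRewards_alt
  obtain ⟨_, hval⟩ := buildAsc_inv s s.length (le_refl _)
  have hasc : ∀ j < s.length, (buildAsc s).getD j 0 = upA s j := by
    intro j hj; rw [buildAsc_eq]; exact hval j hj
  rw [PySem.List.foldl_add, zero_add]
  refine congrArg List.sum (List.map_congr_left fun i hi => ?_)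
  have hi' := List.mem_range.mp hi
  rw [hasc i hi',
    scanB_eq s (buildAsc s) hasc i (s.length - 1 - i) i (upA s i) (le_refl i) (by omega) (by omega),
    show (i:Int) - (i:Int) = 0 by ring, add_zero, max_eq_right (upA_le_mA s _ i)]

-- ===== VERDICT (by name: the statement is the Claim_ definition above) =====
theorem minRewards_spec : Claim_equal_minRewards := by
  intro s _
  unfold Spec_minRewards
  rw [minRewards_eq_sum, minRewards_alt_eq_sum]
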